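-- pv_equiv track=rewrite | github.com/billychl1/skills | skills/itzsubhadip/youtube-transcript-yt-dlp/scripts/yt_transcript.py | _pick_lang
-- ===== SOURCE A (Python) =====
-- from typing import Any, Literal
--
-- def _pick_lang(available: dict[str, Any], prefer: str | None) -> str | None:
--     if not available:
--         return None
--
--     keys = list(available.keys())
--
--     # Exact preferred match first
--     if prefer and prefer in available:
--         return prefer
--
--     # If they asked for en-US, allow en
--     if prefer and "-" in prefer:
--         base = prefer.split("-", 1)[0]
--         if base in available:
--             return base
--
--     # Prefer English, then first available
--     for k in ("en", "en-US", "en-GB"):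
--         if k in available:
--             return k
--
--     return keys[0]
-- ===== SOURCE B (Python) =====
-- def _pick_lang(available, prefer):
--     # one pass: score every key by preference rank, keep the best (ties -> earliest key)
--     base = prefer.split("-", 1)[0] if prefer and "-" in prefer else None
--     best = None  # (rank, key)
--     for k in available:
--         if prefer and k == prefer:
--             r = 0
--         elif base is not None and k == base:
--             r = 1
--         elif k == "en":
--             r = 2
--         elif k == "en-US":
--             r = 3
--         elif k == "en-GB":
--             r = 4
--         else:
--             r = 5
--         if best is None or r < best[0]:
--             best = (r, k)
--     return best[1] if best is not None else None
-- ===== Notes on version B (the rewrite author's own statement) =====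
-- stated objective: alternative
-- what changed: Replaces A's cascade of guarded membership tests (prefer, its base, en, en-US, en-GB, keys[0]) by a single pass over the dict keys that scores each key with a numeric preference rank and keeps the lowest-ranked key, ties going to the earlier key.
import Mathlib
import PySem

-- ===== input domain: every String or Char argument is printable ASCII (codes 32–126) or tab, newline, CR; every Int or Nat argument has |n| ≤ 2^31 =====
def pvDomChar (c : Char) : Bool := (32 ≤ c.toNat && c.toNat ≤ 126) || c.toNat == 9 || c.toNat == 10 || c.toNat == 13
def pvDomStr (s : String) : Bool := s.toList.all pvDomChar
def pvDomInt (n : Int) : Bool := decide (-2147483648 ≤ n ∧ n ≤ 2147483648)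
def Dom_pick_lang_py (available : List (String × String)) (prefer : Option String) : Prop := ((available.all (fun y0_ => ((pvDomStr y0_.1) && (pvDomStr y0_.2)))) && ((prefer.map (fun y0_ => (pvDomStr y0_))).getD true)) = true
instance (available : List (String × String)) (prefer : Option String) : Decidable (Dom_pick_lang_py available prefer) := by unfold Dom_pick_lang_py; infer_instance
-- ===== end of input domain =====

-- B replaces A's cascade of guarded membership tests with a single pass over the keys that
-- scores each key by a preference rank and keeps the best (alternative decomposition; same cost).

-- ===== PORT A =====
-- 'k in available' for the dict rendered as an association list (first-match membership)
def pyKeyIn (available : List (String × String)) (k : String) : Bool :=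
  available.any (fun p => p.1 == k)

-- the final 'for k in ("en","en-US","en-GB"): … return keys[0]' of A
def pickEnglishOrFirst (available : List (String × String)) (keys : List String) : Option String :=
  if pyKeyIn available "en" then some "en"
  else if pyKeyIn available "en-US" then some "en-US"
  else if pyKeyIn available "en-GB" then some "en-GB"
  else PySem.List.pyGet? keys 0

def pick_lang_py (available : List (String × String)) (prefer : Option String) : Option String :=
  if available.isEmpty then none
  else
    let keys := PySem.Set.ofList (available.map (·.1))   -- list(available.keys())
    match prefer with
    | some p =>
      if (p != "") && pyKeyIn available p then some p
      else if (p != "") && PySem.Str.isIn "-" p then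
        let base := ((PySem.Str.splitMax? p "-" 1).getD []).headD ""  -- prefer.split("-",1)[0]
        if pyKeyIn available base then some base
        else pickEnglishOrFirst available keys
      else pickEnglishOrFirst available keys
    | none => pickEnglishOrFirst available keys

-- ===== PORT B =====
-- base = prefer.split("-", 1)[0] if prefer and "-" in prefer else None
def pvBase (prefer : Option String) : Option String :=
  match prefer with
  | some p =>
    if (p != "") && PySem.Str.isIn "-" p then
      some (((PySem.Str.splitMax? p "-" 1).getD []).headD "")
    else none
  | none => none

-- the rank Source B assigns to a key (the if/elif chain computing r)
def pvRank (prefer : Option String) (base : Option String) (k : String) : Nat :=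
  if (match prefer with | some p => (p != "") && (k == p) | none => false) then 0
  else if (match base with | some b => k == b | none => false) then 1
  else if k == "en" then 2
  else if k == "en-US" then 3
  else if k == "en-GB" then 4
  else 5

-- 'if best is None or r < best[0]: best = (r, k)'
def pvStep (f : String → Nat) (best : Option (Nat × String)) (k : String) : Option (Nat × String) :=
  match best with
  | none => some (f k, k)
  | some b => if f k < b.1 then some (f k, k) else some b

def pick_lang_py_alt (available : List (String × String)) (prefer : Option String) : Option String :=
  let f := pvRank prefer (pvBase prefer)
  (available.foldl (fun best kv => pvStep f best kv.1) none).map (·.2)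

-- ===== PRECONDITION & SPEC =====
def Spec_pick_lang_py (available : List (String × String)) (prefer : Option String) (out : Option String) : Prop := out = pick_lang_py_alt available prefer
instance (available : List (String × String)) (prefer : Option String) (out : Option String) : Decidable (Spec_pick_lang_py available prefer out) := by unfold Spec_pick_lang_py; infer_instance

-- ===== CLAIM (what is proved, stated in full; the proofs are below) =====
def Claim_equal_pick_lang_py : Prop := ∀ (available : List (String × String)) (prefer : Option String), Dom_pick_lang_py available prefer → Spec_pick_lang_py available prefer (pick_lang_py available prefer)

-- ===== LEMMAS AND PROOFS =====

-- running minimum of the ranks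
def pvMinF (f : String → Nat) (a : Nat) (l : List String) : Nat :=
  l.foldl (fun a k => min a (f k)) a

theorem pvMinF_le (f : String → Nat) : ∀ (l : List String) (a : Nat), pvMinF f a l ≤ a := by
  intro l
  induction l with
  | nil => intro a; simp [pvMinF]
  | cons k t ih =>
    intro a
    have := ih (min a (f k))
    simp only [pvMinF, List.foldl_cons] at *
    exact le_trans this (min_le_left _ _)

theorem pvMinF_le_mem (f : String → Nat) : ∀ (l : List String) (a : Nat) (k : String),
    k ∈ l → pvMinF f a l ≤ f k := by
  intro l
  induction l with
  | nil => intro a k h; cases h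
  | cons x t ih =>
    intro a k h
    rcases List.mem_cons.mp h with h | h
    · subst h
      exact le_trans (pvMinF_le f t _) (min_le_right _ _)
    · exact ih _ k h

theorem pvMinF_lb (f : String → Nat) : ∀ (l : List String) (a : Nat) (r : Nat),
    r ≤ a → (∀ k ∈ l, r ≤ f k) → r ≤ pvMinF f a l := by
  intro l
  induction l with
  | nil => intro a r ha _; simpa [pvMinF] using ha
  | cons x t ih =>
    intro a r ha hl
    simp only [pvMinF, List.foldl_cons]
    exact ih _ r (le_min ha (hl x (List.mem_cons_self))) (fun k hk => hl k (List.mem_cons_of_mem _ hk))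

-- characterization of B's fold: result = (min rank, first key achieving it)
theorem pvFold_char (f : String → Nat) : ∀ (l : List String) (r0 : Nat) (k0 : String),
    f k0 = r0 →
    List.foldl (pvStep f) (some (r0, k0)) l
      = (List.find? (fun k => f k == pvMinF f r0 l) (k0 :: l)).map (fun k => (f k, k)) := by
  intro l
  induction l with
  | nil =>
    intro r0 k0 h0
    simp [pvMinF, List.find?, h0]
  | cons k t ih =>
    intro r0 k0 h0
    have hunf : pvMinF f r0 (k :: t) = pvMinF f (min r0 (f k)) t := rfl
    rw [List.foldl_cons, hunf]
    by_cases h : f k < r0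
    · have hstep : pvStep f (some (r0, k0)) k = some (f k, k) := by simp [pvStep, h]
      rw [hstep, ih (f k) k rfl, min_eq_right (le_of_lt h)]
      have hm_le : pvMinF f (f k) t ≤ f k := pvMinF_le f t (f k)
      rw [List.find?_cons_of_neg (l := k :: t)
        (by simp only [h0, beq_iff_eq]; omega)]
    · have hstep : pvStep f (some (r0, k0)) k = some (r0, k0) := by simp [pvStep, h]
      rw [hstep, ih r0 k0 h0, min_eq_left (by omega)]
      have hm_le : pvMinF f r0 t ≤ r0 := pvMinF_le f t r0
      by_cases hk0 : f k0 = pvMinF f r0 t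
      · rw [List.find?_cons_of_pos (l := t) (by simp [hk0]),
          List.find?_cons_of_pos (l := k :: t) (by simp [hk0])]
      · rw [List.find?_cons_of_neg (l := t) (by simp [hk0]),
          List.find?_cons_of_neg (l := k :: t) (by simp [hk0]),
          List.find?_cons_of_neg (l := t)
            (by simp only [h0] at hk0 ⊢; simp only [beq_iff_eq]; omega)]

-- B on a nonempty list is the first key of minimal rank
theorem alt_eq_find (a : String × String) (rest : List (String × String)) (prefer : Option String) :
    pick_lang_py_alt (a :: rest) prefer
      = List.find? (fun k => pvRank prefer (pvBase prefer) k
            == pvMinF (pvRank prefer (pvBase prefer)) (pvRank prefer (pvBase prefer) a.1) (rest.map (·.1)))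
          (a.1 :: rest.map (·.1)) := by
  unfold pick_lang_py_alt
  simp only []
  have hfold : ∀ (l : List (String × String)) (acc : Option (Nat × String)),
      l.foldl (fun best kv => pvStep (pvRank prefer (pvBase prefer)) best kv.1) acc
        = (l.map (·.1)).foldl (pvStep (pvRank prefer (pvBase prefer))) acc := by
    intro l
    induction l with
    | nil => intro acc; rfl
    | cons x t ih => intro acc; simp [List.foldl_cons, ih]
  rw [hfold]
  simp only [List.map_cons, List.foldl_cons, pvStep]
  rw [pvFold_char _ _ _ _ rfl]
  cases h : List.find? (fun k => pvRank prefer (pvBase prefer) k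
      == pvMinF (pvRank prefer (pvBase prefer)) (pvRank prefer (pvBase prefer) a.1) (rest.map (·.1)))
      (a.1 :: rest.map (·.1)) <;> simp

-- a branch where the winner is the value v of rank r
theorem find_of_branch (f : String → Nat) (ks : List String) (r : Nat) (v : String)
    (hlow : ∀ k ∈ ks, r ≤ f k)
    (hval : ∀ k ∈ ks, f k = r → k = v)
    (hex : ∃ k ∈ ks, f k = r) :
    ∀ (k0 : String) (l : List String), ks = k0 :: l →
    List.find? (fun k => f k == pvMinF f (f k0) l) ks = some v := by
  intro k0 l hks
  have hm : pvMinF f (f k0) l = r := by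
    apply le_antisymm
    · rcases hex with ⟨k, hk, hfk⟩
      rw [hks] at hk
      rcases List.mem_cons.mp hk with h | h
      · subst h; rw [← hfk]; exact pvMinF_le f l _
      · rw [← hfk]; exact pvMinF_le_mem f l _ k h
    · apply pvMinF_lb
      · exact hlow k0 (by rw [hks]; exact List.mem_cons_self)
      · intro k hk; exact hlow k (by rw [hks]; exact List.mem_cons_of_mem _ hk)
  rw [hm]
  have hsome : (List.find? (fun k => f k == r) ks).isSome := by
    rcases hex with ⟨k, hk, hfk⟩
    exact List.find?_isSome.mpr ⟨k, hk, by simp [hfk]⟩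
  cases hfind : List.find? (fun k => f k == r) ks with
  | none => rw [hfind] at hsome; simp at hsome
  | some c =>
    have hc1 : f c = r := by simpa using List.find?_some hfind
    have hc2 : c ∈ ks := List.mem_of_find?_eq_some hfind
    rw [hval c hc2 hc1]

theorem keys0_head (a : String × String) (rest : List (String × String)) :
    PySem.List.pyGet? (PySem.Set.ofList (a.1 :: rest.map (fun x => x.1))) 0 = some a.1 := by
  have h : PySem.Set.ofList (a.1 :: rest.map (fun x => x.1))
      = PySem.Set.update [a.1] (rest.map (·.1)) := by
    simp [PySem.Set.ofList_eq_foldl, PySem.Set.update, List.foldl_cons, PySem.Set.add,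
      PySem.Set.contains]
  rw [h, PySem.Set.update_eq_append_filter]
  simp [PySem.List.pyGet?, PySem.List.pyIdx?]

-- pyKeyIn is membership among the keys
theorem pyKeyIn_iff (l : List (String × String)) (v : String) :
    pyKeyIn l v = true ↔ v ∈ l.map (·.1) := by
  simp [pyKeyIn, List.any_eq_true, List.mem_map, beq_iff_eq]

theorem pyKeyIn_ne (l : List (String × String)) (v k : String)
    (h : pyKeyIn l v = false) (hk : k ∈ l.map (·.1)) : k ≠ v := by
  intro he
  subst he
  rw [(pyKeyIn_iff l k).mpr hk] at h
  cases h

-- all ranks 5: the scan returns the first key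
theorem find_of_const5 (f : String → Nat) (k0 : String) (l : List String)
    (hall : ∀ k ∈ k0 :: l, f k = 5) :
    List.find? (fun k => f k == pvMinF f (f k0) l) (k0 :: l) = some k0 := by
  have h5 : f k0 = 5 := hall k0 List.mem_cons_self
  have hm : pvMinF f (f k0) l = 5 := by
    apply le_antisymm
    · exact le_trans (pvMinF_le f l _) (le_of_eq h5)
    · exact pvMinF_lb f l _ 5 (le_of_eq h5.symm)
        (fun k hk => le_of_eq (hall k (List.mem_cons_of_mem _ hk)).symm)
  rw [List.find?_cons_of_pos (l := l) (by rw [hm, h5]; rfl)]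

-- the English cascade + keys[0], when no key can rank 0 or 1, equals B's scan
theorem eng_branch (prefer : Option String) (a : String × String) (rest : List (String × String))
    (hP0 : ∀ p, prefer = some p → ∀ k ∈ (a :: rest).map (·.1), ((p != "") && (k == p)) = false)
    (hPb : ∀ b, pvBase prefer = some b → ∀ k ∈ (a :: rest).map (·.1), (k == b) = false) :
    pickEnglishOrFirst (a :: rest) (PySem.Set.ofList ((a :: rest).map (·.1)))
      = List.find? (fun k => pvRank prefer (pvBase prefer) k
            == pvMinF (pvRank prefer (pvBase prefer)) (pvRank prefer (pvBase prefer) a.1) (rest.map (·.1)))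
          (a.1 :: rest.map (·.1)) := by
  have hks : ((a :: rest).map (·.1)) = a.1 :: rest.map (·.1) := rfl
  have hrank : ∀ k ∈ (a :: rest).map (·.1), pvRank prefer (pvBase prefer) k
      = if k == "en" then 2 else if k == "en-US" then 3 else if k == "en-GB" then 4 else 5 := by
    intro k hk
    unfold pvRank
    have h2 : (match pvBase prefer with | some b => (k == b) | none => false) = false := by
      cases hpb : pvBase prefer with
      | none => rfl
      | some b => exact hPb b hpb k hk
    rw [h2]
    cases prefer with
    | none => simp
    | some p => simp [hP0 p rfl k hk]
  unfold pickEnglishOrFirst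
  by_cases hen : pyKeyIn (a :: rest) "en" = true
  · rw [if_pos hen]
    refine (find_of_branch _ _ 2 "en" ?_ ?_ ?_ a.1 (rest.map (·.1)) rfl).symm
    · intro k hk
      rw [hrank k (hks ▸ hk)]
      split_ifs <;> omega
    · intro k hk h2
      rw [hrank k (hks ▸ hk)] at h2
      split_ifs at h2 <;> first | omega | simp_all
    · refine ⟨"en", hks ▸ (pyKeyIn_iff _ _).mp hen, ?_⟩
      rw [hrank "en" ((pyKeyIn_iff _ _).mp hen)]
      simp
  · rw [if_neg hen]
    replace hen : pyKeyIn (a :: rest) "en" = false := by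
      cases h : pyKeyIn (a :: rest) "en" <;> simp_all
    by_cases hus : pyKeyIn (a :: rest) "en-US" = true
    · rw [if_pos hus]
      refine (find_of_branch _ _ 3 "en-US" ?_ ?_ ?_ a.1 (rest.map (·.1)) rfl).symm
      · intro k hk
        have hne : k ≠ "en" := pyKeyIn_ne _ _ _ hen (hks ▸ hk)
        rw [hrank k (hks ▸ hk)]
        split_ifs <;> first | omega | simp_all
      · intro k hk h3
        rw [hrank k (hks ▸ hk)] at h3
        split_ifs at h3 <;> first | omega | simp_all
      · refine ⟨"en-US", hks ▸ (pyKeyIn_iff _ _).mp hus, ?_⟩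
        rw [hrank "en-US" ((pyKeyIn_iff _ _).mp hus)]
        simp
    · rw [if_neg hus]
      replace hus : pyKeyIn (a :: rest) "en-US" = false := by
        cases h : pyKeyIn (a :: rest) "en-US" <;> simp_all
      by_cases hgb : pyKeyIn (a :: rest) "en-GB" = true
      · rw [if_pos hgb]
        refine (find_of_branch _ _ 4 "en-GB" ?_ ?_ ?_ a.1 (rest.map (·.1)) rfl).symm
        · intro k hk
          have hne : k ≠ "en" := pyKeyIn_ne _ _ _ hen (hks ▸ hk)
          have hnus : k ≠ "en-US" := pyKeyIn_ne _ _ _ hus (hks ▸ hk)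
          rw [hrank k (hks ▸ hk)]
          split_ifs <;> first | omega | simp_all
        · intro k hk h4
          rw [hrank k (hks ▸ hk)] at h4
          split_ifs at h4 <;> first | omega | simp_all
        · refine ⟨"en-GB", hks ▸ (pyKeyIn_iff _ _).mp hgb, ?_⟩
          rw [hrank "en-GB" ((pyKeyIn_iff _ _).mp hgb)]
          simp
      · rw [if_neg hgb]
        replace hgb : pyKeyIn (a :: rest) "en-GB" = false := by
          cases h : pyKeyIn (a :: rest) "en-GB" <;> simp_all
        rw [show (PySem.Set.ofList ((a :: rest).map (·.1))) = PySem.Set.ofList (a.1 :: rest.map (·.1)) from rfl,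
          keys0_head a rest]
        refine (find_of_const5 _ a.1 (rest.map (·.1)) ?_).symm
        intro k hk
        have hne : k ≠ "en" := pyKeyIn_ne _ _ _ hen (hks ▸ hk)
        have hnus : k ≠ "en-US" := pyKeyIn_ne _ _ _ hus (hks ▸ hk)
        have hngb : k ≠ "en-GB" := pyKeyIn_ne _ _ _ hgb (hks ▸ hk)
        rw [hrank k (hks ▸ hk)]
        split_ifs <;> first | rfl | simp_all

theorem pick_lang_py_eq (available : List (String × String)) (prefer : Option String) :
    pick_lang_py available prefer = pick_lang_py_alt available prefer := by
  cases available with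
  | nil => cases prefer <;> rfl
  | cons a rest =>
    rw [alt_eq_find]
    have hks : ((a :: rest).map (·.1)) = a.1 :: rest.map (·.1) := rfl
    simp only [pick_lang_py, List.isEmpty_cons, Bool.false_eq_true, if_false]
    cases prefer with
    | none =>
      exact eng_branch none a rest (by intro p hp; cases hp) (by intro b hb; cases hb)
    | some p =>
      by_cases hp : (p != "") = true
      · by_cases hin : pyKeyIn (a :: rest) p = true
        · simp only [hp, hin, Bool.and_self, if_true]
          refine (find_of_branch _ _ 0 p ?_ ?_ ?_ a.1 (rest.map (·.1)) rfl).symm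
          · intro k _; exact Nat.zero_le _
          · intro k hk h0
            unfold pvRank at h0
            split_ifs at h0
            all_goals first | omega | simp_all
          · refine ⟨p, hks ▸ (pyKeyIn_iff _ _).mp hin, ?_⟩
            unfold pvRank
            simp [hp]
        · replace hin : pyKeyIn (a :: rest) p = false := by
            cases h : pyKeyIn (a :: rest) p <;> simp_all
          have hP0 : ∀ q, (some p : Option String) = some q →
              ∀ k ∈ (a :: rest).map (·.1), ((q != "") && (k == q)) = false := by
            intro q hq k hk
            cases hq
            have : k ≠ p := pyKeyIn_ne _ _ _ hin hk
            simp [this]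
          simp only [hp, hin, Bool.and_false, Bool.true_and, Bool.false_eq_true, if_false]
          by_cases hd : PySem.Str.isIn "-" p = true
          · simp only [hd, if_true]
            have hbase : pvBase (some p) = some (((PySem.Str.splitMax? p "-" 1).getD []).headD "") := by
              simp only [pvBase, hp, hd]
              simp
            by_cases hb : pyKeyIn (a :: rest) (((PySem.Str.splitMax? p "-" 1).getD []).headD "") = true
            · simp only [hb, if_true]
              refine (find_of_branch _ _ 1 (((PySem.Str.splitMax? p "-" 1).getD []).headD "")
                ?_ ?_ ?_ a.1 (rest.map (·.1)) rfl).symm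
              · intro k hk
                unfold pvRank
                simp only [hbase, hP0 p rfl k (hks ▸ hk)]
                split_ifs <;> first | omega | simp_all
              · intro k hk h1
                unfold pvRank at h1
                simp only [hbase, hP0 p rfl k (hks ▸ hk)] at h1
                split_ifs at h1 <;> first | omega | simp_all
              · refine ⟨_, hks ▸ (pyKeyIn_iff _ _).mp hb, ?_⟩
                unfold pvRank
                simp only [hbase, hP0 p rfl _ ((pyKeyIn_iff _ _).mp hb)]
                simp
            · replace hb : pyKeyIn (a :: rest) (((PySem.Str.splitMax? p "-" 1).getD []).headD "") = false := by
                cases h : pyKeyIn (a :: rest) (((PySem.Str.splitMax? p "-" 1).getD []).headD "") <;> simp_all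
              simp only [hb, Bool.false_eq_true, if_false]
              refine eng_branch (some p) a rest hP0 ?_
              intro b hbb k hk
              rw [hbase] at hbb
              cases hbb
              have : k ≠ ((PySem.Str.splitMax? p "-" 1).getD []).headD "" :=
                pyKeyIn_ne _ _ _ hb hk
              simpa using this
          · replace hd : PySem.Str.isIn "-" p = false := by
              cases h : PySem.Str.isIn "-" p <;> simp_all
            simp only [hd, Bool.false_eq_true, if_false]
            refine eng_branch (some p) a rest hP0 ?_
            intro b hbb
            simp only [pvBase, hp, hd] at hbb
            simp at hbb
      · replace hp : (p != "") = false := by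
          cases h : (p != "") <;> simp_all
        simp only [hp, Bool.false_and, Bool.false_eq_true, if_false]
        refine eng_branch (some p) a rest ?_ ?_
        · intro q hq k _
          cases hq
          simp [hp]
        · intro b hbb
          simp only [pvBase, hp] at hbb
          simp at hbb

-- ===== VERDICT (by name: the statement is the Claim_ definition above) =====
theorem pick_lang_py_spec : Claim_equal_pick_lang_py := by
  intro available prefer _
  unfold Spec_pick_lang_py
  exact pick_lang_py_eq available prefer
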